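-- pv_equiv track=rewrite | github.com/MrBrantCode/unitest_baseline | mut_generate/mist_train_taco/taco_5988/solution.py | count_ways_to_tile
-- ===== SOURCE A (Python) =====
-- def count_ways_to_tile(n: int, m: int) -> int:
--     MOD = 1000000007
--     dp = [0] * (n + 1)
--
--     for i in range(n + 1):
--         if i < m:
--             dp[i] = 1
--         elif i == m:
--             dp[i] = 2
--         else:
--             dp[i] = (dp[i - 1] + dp[i - m]) % MOD
--
--     return dp[n]
-- ===== SOURCE B (Python) =====
-- def count_ways_to_tile(n: int, m: int) -> int:
--     # Block/prefix-sum (scan) formulation: writing i = q*m + t, telescoping the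
--     # recurrence gives f(q*m + t) = f(q*m - 1) + sum_{s <= t} f((q-1)*m + s),
--     # so each length-m block of consecutive values is the running prefix sum
--     # (cumulative scan) of the previous block shifted by a carry.  One block of
--     # O(m) values is materialised per stage instead of A's O(n) table, and each
--     # stage is a single cumulative-sum pass, with no dp[i-1]/dp[i-m] indexing.
--     MOD = 1000000007
--     if n < m:
--         return 1
--     block = [1] * m
--     for start in range(m, n + 1, m):
--         width = min(m, n + 1 - start)
--         carry = block[-1]
--         acc = carry
--         nxt = []
--         for s in range(width):
--             acc = (acc + block[s]) % MOD
--             nxt.append(acc)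
--         block = nxt
--     return block[-1]
-- ===== Notes on version B (the rewrite author's own statement) =====
-- stated objective: alternative
-- what changed: Replaces A's per-cell dp[i]=dp[i-1]+dp[i-m] sweep over one (n+1)-cell table (with a three-way branch per cell) by a staged block/prefix-sum scan: writing i=q*m+t, each length-m block of values is the cumulative sum of the previous block shifted by a carry, so B materialises one O(m) block per stage, returns 1 directly when n<m, and never allocates or fills the O(n) table.
-- outside the precondition, e.g. on count_ways_to_tile(3, 0): A returns 2, B raises ValueError
import Mathlib
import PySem

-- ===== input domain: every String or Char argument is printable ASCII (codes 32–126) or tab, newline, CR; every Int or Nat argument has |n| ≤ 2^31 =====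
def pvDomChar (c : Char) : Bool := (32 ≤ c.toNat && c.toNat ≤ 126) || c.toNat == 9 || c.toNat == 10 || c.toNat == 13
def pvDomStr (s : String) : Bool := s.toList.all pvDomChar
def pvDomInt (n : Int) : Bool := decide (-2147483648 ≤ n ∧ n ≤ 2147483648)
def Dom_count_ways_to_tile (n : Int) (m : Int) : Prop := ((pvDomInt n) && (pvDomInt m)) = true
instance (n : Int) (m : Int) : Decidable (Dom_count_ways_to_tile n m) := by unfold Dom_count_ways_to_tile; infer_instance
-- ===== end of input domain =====

-- B replaces A's per-cell two-term recurrence over one (n+1)-cell table by a staged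
-- block/prefix-sum scan: each length-m block of values is the cumulative sum of the
-- previous block shifted by a carry (O(m) memory); objective: alternative.

-- ===== PORT A =====
def count_ways_to_tile (n : Int) (m : Int) : Int :=
  let MOD : Int := 1000000007
  let dp0 : Array Int := Array.replicate (n + 1).toNat 0
  let dp := (PySem.List.pyRange 0 (n + 1) 1).foldl (fun dp i =>
    if i < m then dp.set! i.toNat 1
    else if i = m then dp.set! i.toNat 2
    else dp.set! i.toNat
      (PySem.Int.mod (dp.getD (i - 1).toNat 0 + dp.getD (i - m).toNat 0) MOD)) dp0
  dp.getD n.toNat 0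

-- ===== PORT B =====
def count_ways_to_tile_alt (n : Int) (m : Int) : Int :=
  let MOD : Int := 1000000007
  if n < m then 1
  else
    let block0 : List Int := List.replicate m.toNat 1
    let block := (PySem.List.pyRange m (n + 1) m).foldl (fun block start =>
      let width := min m (n + 1 - start)
      let carry := PySem.List.pyGetD block (-1) 0
      let st := (List.range width.toNat).foldl (fun (st : Int × List Int) (s : Nat) =>
        let acc := PySem.Int.mod (st.1 + PySem.List.pyGetD block (s : Int) 0) MOD
        (acc, st.2 ++ [acc])) (carry, [])
      st.2) block0
    PySem.List.pyGetD block (-1) 0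

-- ===== PRECONDITION & SPEC =====
-- Pre_ excludes n < 0 and m < 0, on which A raises IndexError, and m = 0, on which A
-- returns 2 through a self-referential dp read while B naturally raises ValueError
-- (range step 0).
def Pre_count_ways_to_tile (n : Int) (m : Int) : Prop := 0 ≤ n ∧ 1 ≤ m
instance (n : Int) (m : Int) : Decidable (Pre_count_ways_to_tile n m) := by
  unfold Pre_count_ways_to_tile; infer_instance
def pvWitness_count_ways_to_tile : Int × Int := (7, 3)

def Spec_count_ways_to_tile (n : Int) (m : Int) (out : Int) : Prop := out = count_ways_to_tile_alt n m
instance (n : Int) (m : Int) (out : Int) : Decidable (Spec_count_ways_to_tile n m out) := by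
  unfold Spec_count_ways_to_tile; infer_instance

-- ===== CLAIM (what is proved, stated in full; the proofs are below) =====
def Claim_equal_count_ways_to_tile : Prop := ∀ (n : Int) (m : Int), Dom_count_ways_to_tile n m → Pre_count_ways_to_tile n m → Spec_count_ways_to_tile n m (count_ways_to_tile n m)

-- ===== LEMMAS AND PROOFS =====

-- The pure (un-reduced) recurrence behind both programs: g m i = 1 for i < m,
-- else g m (i-1) + g m (i-m)  (A's dp[m] = 2 equals 1 + 1, so no extra base case).
def pvG (m : Nat) (i : Nat) : Nat :=
  if i < m ∨ m = 0 then 1 else pvG m (i - 1) + pvG m (i - m)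
termination_by i
decreasing_by all_goals omega

theorem pvG_lt {m i : Nat} (h : i < m) : pvG m i = 1 := by
  rw [pvG.eq_def, if_pos (Or.inl h)]

theorem pvG_rec {m i : Nat} (hm : 1 ≤ m) (h : m ≤ i) : pvG m i = pvG m (i - 1) + pvG m (i - m) := by
  rw [pvG.eq_def, if_neg (by omega)]

-- Transfer between the Array A's port mutates and its List of entries.
theorem pvArr_set_toList (a : Array Int) (i : Nat) (v : Int) :
    (a.set! i v).toList = a.toList.set i v := by
  simp [Array.set!, Array.toList_setIfInBounds]

theorem pvArr_getD_toList (a : Array Int) (i : Nat) (d : Int) : a.getD i d = a.toList.getD i d := by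
  simp [Array.getD, List.getD]
  split
  · rename_i h
    rw [Array.getElem?_eq_getElem h]
    rfl
  · rename_i h
    rw [Array.getElem?_eq_none (by omega)]
    rfl

-- A's loop state after the first j iterations.
theorem pvA_loop (m L j : Nat) (hm : 1 ≤ m) (hj : j ≤ L) :
    ((PySem.List.pyRange 0 (j : Int) 1).foldl (fun dp i =>
      if i < (m : Int) then dp.set! i.toNat 1
      else if i = (m : Int) then dp.set! i.toNat 2
      else dp.set! i.toNat
        (PySem.Int.mod (dp.getD (i - 1).toNat 0 + dp.getD (i - (m : Int)).toNat 0) 1000000007))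
      (Array.replicate L (0 : Int))).toList
    = (List.range j).map (fun i => ((pvG m i : Int)) % 1000000007) ++ List.replicate (L - j) (0 : Int) := by
  induction j with
  | zero => simp [PySem.List.pyRange_one_eq_nil]
  | succ j ih =>
    have hjL : j < L := by omega
    rw [show ((j + 1 : Nat) : Int) = (j : Int) + 1 by push_cast; ring,
      PySem.List.pyRange_one_succ_right (by positivity), List.foldl_append]
    simp only [List.foldl_cons, List.foldl_nil]
    set f : Nat → Int := fun i => ((pvG m i : Int)) % 1000000007 with hf
    set A : Array Int := (PySem.List.pyRange 0 (j : Int) 1).foldl (fun dp i =>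
      if i < (m : Int) then dp.set! i.toNat 1
      else if i = (m : Int) then dp.set! i.toNat 2
      else dp.set! i.toNat
        (PySem.Int.mod (dp.getD (i - 1).toNat 0 + dp.getD (i - (m : Int)).toNat 0) 1000000007))
      (Array.replicate L (0 : Int)) with hA
    have ihl : A.toList = (List.range j).map f ++ List.replicate (L - j) (0 : Int) := ih (by omega)
    have hlen : ((List.range j).map f).length = j := by simp
    have hrep : List.replicate (L - j) (0 : Int) = 0 :: List.replicate (L - (j + 1)) 0 := by
      rw [show L - j = (L - (j + 1)) + 1 by omega, List.replicate_succ]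
    have htn : ((j : Int)).toNat = j := Int.toNat_natCast j
    have hset : ∀ v : Int, (A.set! ((j : Int)).toNat v).toList
        = (List.range j).map f ++ v :: List.replicate (L - (j + 1)) (0 : Int) := by
      intro v
      rw [pvArr_set_toList, htn, ihl, hrep, ← hlen, List.set_append]
      simp
    have hRHS : (List.range (j + 1)).map f ++ List.replicate (L - (j + 1)) (0 : Int)
        = (List.range j).map f ++ f j :: List.replicate (L - (j + 1)) (0 : Int) := by
      rw [List.range_succ, List.map_append]; simp
    rw [hRHS]
    split_ifs with h1 h2
    · have hjm : j < m := by exact_mod_cast h1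
      rw [hset]
      have hv : f j = 1 := by rw [hf]; dsimp only; rw [pvG_lt hjm]; norm_num
      rw [hv]
    · have hjm : j = m := by exact_mod_cast h2
      rw [hset]
      have hv : f j = 2 := by
        rw [hf, hjm]; dsimp only
        rw [pvG_rec (i := m) hm (by omega), pvG_lt (by omega : m - 1 < m), pvG_lt (by omega : m - m < m)]
        norm_num
      rw [hv]
    · have hjm : m < j := by
        have h1' : ¬ (j < m) := fun h => h1 (by exact_mod_cast h)
        have h2' : j ≠ m := fun h => h2 (by exact_mod_cast h)
        omega
      have e1 : ((j : Int) - 1).toNat = j - 1 := by omega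
      have e2 : ((j : Int) - (m : Int)).toNat = j - m := by omega
      rw [e1, e2, pvArr_getD_toList, pvArr_getD_toList, ihl]
      rw [List.getD_append _ _ _ _ (by omega : j - 1 < ((List.range j).map f).length),
        List.getD_append _ _ _ _ (by omega : j - m < ((List.range j).map f).length)]
      rw [hf]
      rw [PySem.List.getD_map_range _ _ _ _ (by omega : j - 1 < j),
        PySem.List.getD_map_range _ _ _ _ (by omega : j - m < j)]
      rw [hset]
      have hfj : ((pvG m (j - 1) : Int) % 1000000007 + (pvG m (j - m) : Int) % 1000000007) % 1000000007
          = (pvG m j : Int) % 1000000007 := by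
        rw [← Int.add_emod]
        congr 1
        rw [show pvG m j = pvG m (j - 1) + pvG m (j - m) from pvG_rec hm (by omega)]
        push_cast; ring
      rw [PySem.Int.mod_eq_emod_of_pos (by norm_num), hfj]

theorem pvA_eq (n m : Int) (hn : 0 ≤ n) (hm : 1 ≤ m) :
    count_ways_to_tile n m = ((pvG m.toNat n.toNat : Int)) % 1000000007 := by
  obtain ⟨n', rfl⟩ : ∃ n' : Nat, n = (n' : Int) := ⟨n.toNat, by omega⟩
  obtain ⟨m', rfl⟩ : ∃ m' : Nat, m = (m' : Int) := ⟨m.toNat, by omega⟩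
  have hm' : 1 ≤ m' := by exact_mod_cast hm
  unfold count_ways_to_tile
  dsimp only
  rw [pvArr_getD_toList,
    show ((n' : Int) + 1).toNat = n' + 1 by omega,
    show ((n' : Int) + 1) = ((n' + 1 : Nat) : Int) by push_cast; ring,
    pvA_loop m' (n' + 1) (n' + 1) hm' (le_refl _)]
  rw [Nat.sub_self, List.replicate_zero, List.append_nil]
  rw [show ((n' : Int)).toNat = n' from Int.toNat_natCast n',
    PySem.List.getD_map_range _ _ _ _ (by omega : n' < n' + 1)]
  simp

-- ---- B side ----

-- pyRange with a positive step, as a map over List.range (from pyRange's definition)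
theorem pvRange_pos_map (a b s : Int) (hs : 0 < s) (hab : a < b) :
    PySem.List.pyRange a b s
      = (List.range ((b - a + s - 1) / s).toNat).map (fun k : Nat => a + s * (k : Int)) := by
  unfold PySem.List.pyRange
  rw [if_neg (by omega)]
  simp only [if_pos hs, if_pos hab]

-- the value sequence both programs compute, reduced mod 1e9+7
def pvF (m' : Nat) (i : Nat) : Int := ((pvG m' i : Int)) % 1000000007

-- the block of values held after k outer stages of B
def pvBlk (m' n' k : Nat) : List Int :=
  (List.range (min m' (n' + 1 - k * m'))).map (fun s => pvF m' (k * m' + s))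

theorem pvF_step (m' i : Nat) (hm : 1 ≤ m') (hi : m' ≤ i) :
    PySem.Int.mod (pvF m' (i - 1) + pvF m' (i - m')) 1000000007 = pvF m' i := by
  unfold pvF
  rw [PySem.Int.mod_eq_emod_of_pos (by norm_num), ← Int.add_emod]
  congr 1
  rw [show pvG m' i = pvG m' (i - 1) + pvG m' (i - m') from pvG_rec hm hi]
  push_cast; ring

theorem pvBlk_length (m' n' k : Nat) : (pvBlk m' n' k).length = min m' (n' + 1 - k * m') := by
  simp [pvBlk]

-- B's inner scan: starting from the carry f((q+1)m-1), accumulating the previous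
-- block produces the next block's values f((q+1)m+t).
theorem pvInner (m' n' q : Nat) (hm : 1 ≤ m') (hq : (q + 1) * m' ≤ n') :
    ∀ w, w ≤ min m' (n' + 1 - (q + 1) * m') →
    (List.range w).foldl (fun (st : Int × List Int) (s : Nat) =>
      (PySem.Int.mod (st.1 + PySem.List.pyGetD (pvBlk m' n' q) (s : Int) 0) 1000000007,
       st.2 ++ [PySem.Int.mod (st.1 + PySem.List.pyGetD (pvBlk m' n' q) (s : Int) 0) 1000000007]))
      (pvF m' ((q + 1) * m' - 1), [])
    = (pvF m' ((q + 1) * m' + w - 1), (List.range w).map (fun t => pvF m' ((q + 1) * m' + t))) := by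
  intro w
  induction w with
  | zero => intro _; simp
  | succ w ih =>
    intro hw
    have hqm : q * m' + m' = (q + 1) * m' := by ring
    rw [List.range_succ, List.foldl_append, ih (by omega)]
    simp only [List.foldl_cons, List.foldl_nil]
    have hwm : w < m' := by omega
    have hprevfull : min m' (n' + 1 - q * m') = m' := by omega
    have hread : PySem.List.pyGetD (pvBlk m' n' q) ((w : Nat) : Int) 0 = pvF m' (q * m' + w) := by
      rw [PySem.List.pyGetD_natCast]
      unfold pvBlk
      rw [hprevfull, PySem.List.getD_map_range _ _ _ _ hwm]
    rw [hread]
    have hstep : PySem.Int.mod (pvF m' ((q + 1) * m' + w - 1) + pvF m' (q * m' + w)) 1000000007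
        = pvF m' ((q + 1) * m' + w) := by
      have h1 : (q + 1) * m' + w - m' = q * m' + w := by omega
      have := pvF_step m' ((q + 1) * m' + w) hm (by omega)
      rwa [h1] at this
    rw [hstep]
    have harg : (q + 1) * m' + (w + 1) - 1 = (q + 1) * m' + w := by omega
    rw [harg]
    simp

-- B's outer loop: after k full stages the held block is pvBlk k.
theorem pvOuter (m' n' : Nat) (hm : 1 ≤ m') (hmn : m' ≤ n') :
    ∀ k, k * m' ≤ n' →
    ((List.range k).map (fun j : Nat => (m' : Int) + (m' : Int) * (j : Int))).foldl
      (fun block start =>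
        ((List.range (min (m' : Int) ((n' : Int) + 1 - start)).toNat).foldl
          (fun (st : Int × List Int) (s : Nat) =>
            (PySem.Int.mod (st.1 + PySem.List.pyGetD block (s : Int) 0) 1000000007,
             st.2 ++ [PySem.Int.mod (st.1 + PySem.List.pyGetD block (s : Int) 0) 1000000007]))
          (PySem.List.pyGetD block (-1) 0, [])).2)
      (List.replicate m' 1)
    = pvBlk m' n' k := by
  intro k
  induction k with
  | zero =>
    intro _
    unfold pvBlk
    rw [show min m' (n' + 1 - 0 * m') = m' by omega]
    apply List.ext_getElem (by simp)
    intro i h1 h2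
    simp only [List.getElem_replicate, List.getElem_map, List.getElem_range]
    rw [show (0 : Nat) * m' + i = i by omega]
    unfold pvF
    rw [pvG_lt (by simpa using h1)]
    norm_num
  | succ k ih =>
    intro hk1
    have hkm : k * m' + m' = (k + 1) * m' := by ring
    have hk0 : k * m' ≤ n' := by omega
    rw [List.range_succ, List.map_append, List.foldl_append, ih hk0]
    simp only [List.map_cons, List.map_nil, List.foldl_cons, List.foldl_nil]
    have hcast : (m' : Int) + (m' : Int) * (k : Int) = (((k + 1) * m' : Nat) : Int) := by
      push_cast; ring
    have hwidth : (min (m' : Int) ((n' : Int) + 1 - ((m' : Int) + (m' : Int) * (k : Int)))).toNat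
        = min m' (n' + 1 - (k + 1) * m') := by
      rw [hcast]; omega
    have hfull : min m' (n' + 1 - k * m') = m' := by omega
    have hcarry : PySem.List.pyGetD (pvBlk m' n' k) (-1) 0 = pvF m' ((k + 1) * m' - 1) := by
      rw [PySem.List.pyGetD_neg_ofNat _ 1 0 (by omega)
        (by rw [pvBlk_length, hfull]; omega)]
      unfold pvBlk
      simp only [List.getElem_map, List.getElem_range, List.length_map, List.length_range, hfull]
      congr 1
      omega
    rw [hwidth, hcarry, pvInner m' n' k hm (by omega) _ (le_refl _)]
    unfold pvBlk
    rfl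

theorem pvB_eq (n m : Int) (hn : 0 ≤ n) (hm : 1 ≤ m) :
    count_ways_to_tile_alt n m = ((pvG m.toNat n.toNat : Int)) % 1000000007 := by
  obtain ⟨n', rfl⟩ : ∃ n' : Nat, n = (n' : Int) := ⟨n.toNat, by omega⟩
  obtain ⟨m', rfl⟩ : ∃ m' : Nat, m = (m' : Int) := ⟨m.toNat, by omega⟩
  have hm' : 1 ≤ m' := by exact_mod_cast hm
  simp only [Int.toNat_natCast]
  unfold count_ways_to_tile_alt
  dsimp only
  rcases Nat.lt_or_ge n' m' with h | h
  · rw [if_pos (by exact_mod_cast h), pvG_lt h]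
    norm_num
  · rw [if_neg (by exact_mod_cast Nat.not_lt.2 h), Int.toNat_natCast]
    rw [pvRange_pos_map (m' : Int) ((n' : Int) + 1) (m' : Int) (by exact_mod_cast hm')
      (by exact_mod_cast Nat.lt_succ_of_le h)]
    rw [show ((n' : Int) + 1 - (m' : Int) + (m' : Int) - 1) = (n' : Int) by ring]
    rw [show ((n' : Int) / (m' : Int)) = ((n' / m' : Nat) : Int) from (Int.natCast_div n' m').symm,
      Int.toNat_natCast]
    have hdiv : (n' / m') * m' ≤ n' := Nat.div_mul_le_self n' m'
    rw [pvOuter m' n' hm' h (n' / m') hdiv]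
    -- read the last entry of the final (possibly partial) block
    have hmod : n' % m' < m' := Nat.mod_lt _ (by omega)
    have hdm : m' * (n' / m') + n' % m' = n' := Nat.div_add_mod n' m'
    have hcomm : m' * (n' / m') = (n' / m') * m' := Nat.mul_comm m' (n' / m')
    have hL : min m' (n' + 1 - (n' / m') * m') = n' % m' + 1 := by omega
    rw [PySem.List.pyGetD_neg_ofNat _ 1 0 (by omega)
      (by rw [pvBlk_length, hL]; omega)]
    unfold pvBlk
    simp only [List.getElem_map, List.getElem_range, List.length_map, List.length_range, hL]
    unfold pvF
    rw [show (n' / m') * m' + (n' % m' + 1 - 1) = n' by omega]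

-- ===== VERDICT (by name: the statement is the Claim_ definition above) =====
theorem count_ways_to_tile_spec : Claim_equal_count_ways_to_tile := by
  intro n m _ hpre
  obtain ⟨hn, hm⟩ := hpre
  show count_ways_to_tile n m = count_ways_to_tile_alt n m
  rw [pvA_eq n m hn hm, pvB_eq n m hn hm]
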